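-- pv_equiv track=rewrite | github.com/Joskmy/Ejercicios-varios | Ejercicios RPC/Discus.py | puntuacion_maxima_discos
-- ===== SOURCE A (Python) =====
-- def puntuacion_maxima_discos(n, m, cuadrados):
--     # Inicializamos la puntuación máxima como negativo infinito
--     max_score = float('-inf')
--
--     # Mantenemos el mejor puntaje alcanzable desde cada posición
--     mejor_puntuacion = [0] * n
--
--     def actualizar_mejor_puntuacion(i):
--         puntuacion_inicio = cuadrados[i]
--         for j in range(1, m + 1):
--             if i + j < n:
--                 puntuacion = cuadrados[i + j] - puntuacion_inicio
--                 mejor_puntuacion[i + j] = max(mejor_puntuacion[i + j], puntuacion)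
--         return max(mejor_puntuacion[i], max_score)
--
--     # Usamos map() para aplicar la función a cada índice
--     max_score = max(map(actualizar_mejor_puntuacion, range(n)))
--
--     return max_score
-- ===== SOURCE B (Python) =====
-- def puntuacion_maxima_discos(n, m, cuadrados):
--     # For each disc i, the best single gain is cuadrados[i] minus the minimum
--     # score among the up-to-m preceding discs; the running best starts at 0
--     # (disc 0, or an unreachable window, contributes nothing).
--     best = 0
--     for i in range(n):
--         v = cuadrados[i]
--         lo = i - m if i - m > 0 else 0
--         if lo < i:
--             gap = v - min(cuadrados[lo:i])
--             if gap > best: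
--                 best = gap
--     return best
-- ===== Notes on version B (the rewrite author's own statement) =====
-- stated objective: simpler
-- what changed: A pushes every gap forward into a mutated best-score array via nested loops and a map() closure over a stale -inf; B keeps no array and, for each index i, pulls min(cuadrados[lo:i]) of the preceding window and maxes the single gap into a running best.
import Mathlib
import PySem

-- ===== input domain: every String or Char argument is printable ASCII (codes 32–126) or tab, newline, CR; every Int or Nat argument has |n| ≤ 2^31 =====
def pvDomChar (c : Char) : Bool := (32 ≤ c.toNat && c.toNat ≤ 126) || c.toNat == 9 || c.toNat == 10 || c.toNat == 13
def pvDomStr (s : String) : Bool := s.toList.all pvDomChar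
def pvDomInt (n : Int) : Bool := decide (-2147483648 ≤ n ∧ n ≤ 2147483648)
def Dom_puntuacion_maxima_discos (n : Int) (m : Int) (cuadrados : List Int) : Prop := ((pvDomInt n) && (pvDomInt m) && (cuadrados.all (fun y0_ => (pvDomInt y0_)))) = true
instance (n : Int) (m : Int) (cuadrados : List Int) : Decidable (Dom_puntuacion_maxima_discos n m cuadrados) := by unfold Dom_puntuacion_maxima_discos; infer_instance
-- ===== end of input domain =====

-- B replaces A's forward-writing best-score array (nested loops + map() over a stale -inf) by a read-only
-- scan maxing cuadrados[i] - min(previous window) into a running best: simpler, no auxiliary array.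


-- ===== PORT A =====
-- the inner for-loop of actualizar_mejor_puntuacion(i): writes max(old, cuadrados[i+j]-cuadrados[i]) at i+j for j=1..m with i+j<n
def pvAinner (n : Int) (m : Int) (cuadrados : List Int) (i : Int) (mej : List Int) : List Int :=
  let inicio := PySem.List.pyGetD cuadrados i 0
  (PySem.List.pyRange 1 (m + 1) 1).foldl (fun mej j =>
    if i + j < n then
      PySem.List.pySetD mej (i + j)
        (max (PySem.List.pyGetD mej (i + j) 0) (PySem.List.pyGetD cuadrados (i + j) 0 - inicio))
    else mej) mej

-- one step of max(map(actualizar_mejor_puntuacion, range(n))): max() consumes the whole map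
-- before assigning max_score, so inside the closure max(mejor[i], max_score) is max(mejor[i], -inf) = mejor[i]
def pvAstep (n : Int) (m : Int) (cuadrados : List Int) (s : List Int × Option Int) (i : Int) : List Int × Option Int :=
  let mejor' := pvAinner n m cuadrados i s.1
  let ret := PySem.List.pyGetD mejor' i 0
  (mejor', some (match s.2 with | none => ret | some a => max a ret))

def puntuacion_maxima_discos (n : Int) (m : Int) (cuadrados : List Int) : Int :=
  (((PySem.List.pyRange 0 n 1).foldl (pvAstep n m cuadrados) (List.replicate n.toNat 0, none)).2).getD 0

-- ===== PORT B =====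
def pvBstep (n : Int) (m : Int) (cuadrados : List Int) (best : Int) (i : Int) : Int :=
  let v := PySem.List.pyGetD cuadrados i 0
  let lo := if i - m > 0 then i - m else 0
  if lo < i then
    let gap := v - (PySem.List.min? (PySem.List.slice cuadrados (some lo) (some i)) (fun x => x)).getD 0
    if gap > best then gap else best
  else best

def puntuacion_maxima_discos_alt (n : Int) (m : Int) (cuadrados : List Int) : Int :=
  (PySem.List.pyRange 0 n 1).foldl (pvBstep n m cuadrados) 0

-- ===== PRECONDITION & SPEC =====
-- Pre_ excludes exactly the inputs on which A raises: n ≤ 0 (ValueError, max() of an empty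
-- sequence) and len(cuadrados) < n (IndexError reading cuadrados[i]); B raises IndexError
-- on the latter as well, and nothing is claimed on either.
def Pre_puntuacion_maxima_discos (n : Int) (m : Int) (cuadrados : List Int) : Prop :=
  1 ≤ n ∧ n ≤ (cuadrados.length : Int)
instance (n : Int) (m : Int) (cuadrados : List Int) : Decidable (Pre_puntuacion_maxima_discos n m cuadrados) := by unfold Pre_puntuacion_maxima_discos; infer_instance
def pvWitness_puntuacion_maxima_discos : Int × Int × List Int := (3, 2, [1, 5, 2])

def Spec_puntuacion_maxima_discos (n : Int) (m : Int) (cuadrados : List Int) (out : Int) : Prop := out = puntuacion_maxima_discos_alt n m cuadrados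
instance (n : Int) (m : Int) (cuadrados : List Int) (out : Int) : Decidable (Spec_puntuacion_maxima_discos n m cuadrados out) := by unfold Spec_puntuacion_maxima_discos; infer_instance

-- ===== CLAIM (what is proved, stated in full; the proofs are below) =====
def Claim_equal_puntuacion_maxima_discos : Prop := ∀ (n : Int) (m : Int) (cuadrados : List Int), Dom_puntuacion_maxima_discos n m cuadrados → Pre_puntuacion_maxima_discos n m cuadrados → Spec_puntuacion_maxima_discos n m cuadrados (puntuacion_maxima_discos n m cuadrados)

-- ===== LEMMAS AND PROOFS =====

-- abstract description of A's array after the first t outer steps: pvF t k is mejor_puntuacion[k]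
def pvF (n : Int) (m : Int) (c : List Int) : Nat → Nat → Int
  | 0, _ => 0
  | t + 1, k =>
    if t < k ∧ (k : Int) ≤ (t : Int) + m ∧ (k : Int) < n then
      max (pvF n m c t k) (c.getD k 0 - c.getD t 0)
    else pvF n m c t k

-- value recorded by A's closure at outer step t
def pvR (n : Int) (m : Int) (c : List Int) (t : Nat) : Int := pvF n m c (t + 1) t

-- A's running maximum over the first t recorded values
def pvE (n : Int) (m : Int) (c : List Int) : Nat → Int
  | 0 => 0
  | t + 1 => max (pvE n m c t) (pvR n m c t)

-- A's accumulator (None before the first step)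
def pvAC (n : Int) (m : Int) (c : List Int) : Nat → Option Int
  | 0 => none
  | t + 1 => some (match pvAC n m c t with
      | none => pvR n m c t
      | some a => max a (pvR n m c t))

def pvMJ (n : Int) (m : Int) (c : List Int) (t : Nat) : List Int :=
  (List.range n.toNat).map (pvF n m c t)

theorem pvInnerFold (n : Int) (c : List Int) (i X : Int) (hi : 0 ≤ i)
    (J : List Int) (hJ : ∀ j ∈ J, 1 ≤ j) (mej : List Int) (k : Nat) :
    (J.foldl (fun mej j =>
      if i + j < n then
        PySem.List.pySetD mej (i + j)
          (max (PySem.List.pyGetD mej (i + j) 0) (PySem.List.pyGetD c (i + j) 0 - X))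
      else mej) mej)[k]? =
    if (∃ j ∈ J, i + j = (k : Int) ∧ (k : Int) < n) then
      mej[k]?.map (fun v => max v (PySem.List.pyGetD c (k : Int) 0 - X))
    else mej[k]? := by
  induction J generalizing mej with
  | nil => simp
  | cons j0 J' ih =>
    have hj0 : 1 ≤ j0 := hJ j0 (by simp)
    have hJ' : ∀ j ∈ J', 1 ≤ j := fun j hj => hJ j (by simp [hj])
    simp only [List.foldl_cons]
    rw [ih hJ']
    by_cases hn' : i + j0 < n
    · by_cases hk : i + j0 = (k : Int)
      · have hkn : ((k : Int) < n) := hk ▸ hn'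
        have htn : (i + j0).toNat = k := by omega
        have hset : (PySem.List.pySetD mej (i + j0)
            (max (PySem.List.pyGetD mej (i + j0) 0) (PySem.List.pyGetD c (i + j0) 0 - X)))[k]? =
            mej[k]?.map (fun v => max v (PySem.List.pyGetD c (k : Int) 0 - X)) := by
          rw [PySem.List.pySetD_of_nonneg mej _ (by omega), htn, hk]
          rw [PySem.List.pyGetD_natCast]
          by_cases hlen : k < mej.length
          · simp [List.getElem?_set, hlen, List.getElem?_eq_getElem hlen,
              List.getD_eq_getElem mej 0 hlen]
          · have hlen' : mej.length ≤ k := by omega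
            simp [List.getElem?_set, hlen, List.getElem?_eq_none hlen']
        simp only [hn', if_true, hset]
        have hex : ∃ j ∈ j0 :: J', i + j = (k : Int) ∧ (k : Int) < n := ⟨j0, by simp, hk, hkn⟩
        rw [if_pos hex]
        split_ifs with h2
        · cases mej[k]? <;> simp [max_assoc]
        · rfl
      · have hset : (PySem.List.pySetD mej (i + j0)
            (max (PySem.List.pyGetD mej (i + j0) 0) (PySem.List.pyGetD c (i + j0) 0 - X)))[k]? =
            mej[k]? := by
          rw [PySem.List.pySetD_of_nonneg mej _ (by omega)]
          have : (i + j0).toNat ≠ k := by omega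
          simp [List.getElem?_set, this]
        simp only [hn', if_true, hset]
        have hcond : (∃ j ∈ j0 :: J', i + j = (k : Int) ∧ (k : Int) < n) ↔
            (∃ j ∈ J', i + j = (k : Int) ∧ (k : Int) < n) := by
          constructor
          · rintro ⟨j, hj, hjk⟩
            rcases List.mem_cons.mp hj with rfl | hj
            · exact absurd hjk.1 hk
            · exact ⟨j, hj, hjk⟩
          · rintro ⟨j, hj, hjk⟩; exact ⟨j, List.mem_cons_of_mem _ hj, hjk⟩
        by_cases hq : ∃ j ∈ J', i + j = (k : Int) ∧ (k : Int) < n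
        · rw [if_pos hq, if_pos (hcond.mpr hq)]
        · rw [if_neg hq, if_neg (fun h => hq (hcond.mp h))]
    · simp only [hn', if_false]
      have hcond : (∃ j ∈ j0 :: J', i + j = (k : Int) ∧ (k : Int) < n) ↔
          (∃ j ∈ J', i + j = (k : Int) ∧ (k : Int) < n) := by
        constructor
        · rintro ⟨j, hj, hjk⟩
          rcases List.mem_cons.mp hj with rfl | hj
          · exact absurd (hjk.1 ▸ hjk.2) hn'
          · exact ⟨j, hj, hjk⟩
        · rintro ⟨j, hj, hjk⟩; exact ⟨j, List.mem_cons_of_mem _ hj, hjk⟩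
      by_cases hq : ∃ j ∈ J', i + j = (k : Int) ∧ (k : Int) < n
      · rw [if_pos hq, if_pos (hcond.mpr hq)]
      · rw [if_neg hq, if_neg (fun h => hq (hcond.mp h))]

theorem pvAinner_getElem (n m : Int) (c : List Int) (t k : Nat) (mej : List Int) :
    (pvAinner n m c (t : Int) mej)[k]? =
    if (t < k ∧ (k : Int) ≤ (t : Int) + m ∧ (k : Int) < n) then
      mej[k]?.map (fun v => max v (c.getD k 0 - c.getD t 0))
    else mej[k]? := by
  unfold pvAinner
  rw [pvInnerFold n c (t : Int) (PySem.List.pyGetD c (t : Int) 0) (by omega) _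
    (fun j hj => ((PySem.List.mem_pyRange_one).mp hj).1) mej k]
  have hc : (∃ j ∈ PySem.List.pyRange 1 (m + 1) 1, (t : Int) + j = (k : Int) ∧ (k : Int) < n) ↔
      (t < k ∧ (k : Int) ≤ (t : Int) + m ∧ (k : Int) < n) := by
    simp only [PySem.List.mem_pyRange_one]
    constructor
    · rintro ⟨j, ⟨h1, h2⟩, h3, h4⟩
      refine ⟨by omega, by omega, h4⟩
    · rintro ⟨h1, h2, h3⟩
      exact ⟨(k : Int) - (t : Int), ⟨by omega, by omega⟩, by omega, h3⟩
  simp only [PySem.List.pyGetD_natCast]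
  rw [if_congr hc rfl rfl]

theorem pvAouter (n m : Int) (c : List Int) (hn : 1 ≤ n) (t : Nat) (ht : t ≤ n.toNat) :
    (PySem.List.pyRange 0 (t : Int) 1).foldl (pvAstep n m c) (List.replicate n.toNat 0, none)
      = (pvMJ n m c t, pvAC n m c t) := by
  induction t with
  | zero =>
    rw [show ((0 : Nat) : Int) = 0 by norm_num, PySem.List.pyRange_one_eq_nil (le_refl 0)]
    simp only [List.foldl_nil, pvMJ, pvAC, pvF]
    rw [List.map_const']
    simp
  | succ t ih =>
    have ht' : t ≤ n.toNat := by omega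
    have htn : (t : Int) < n := by omega
    rw [show ((t + 1 : Nat) : Int) = (t : Int) + 1 by push_cast; ring,
      PySem.List.pyRange_one_succ_right (by omega), List.foldl_append, ih ht']
    have hM : pvAinner n m c (t : Int) (pvMJ n m c t) = pvMJ n m c (t + 1) := by
      apply List.ext_getElem?
      intro k
      rw [pvAinner_getElem]
      by_cases hk : k < n.toNat
      · simp only [pvMJ, List.getElem?_map, List.getElem?_range, hk, if_pos hk]
        simp only [Option.map_some]
        show _ = some (pvF n m c (t + 1) k)
        rw [pvF]
        split_ifs with hcond
        · rfl
        · rfl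
      · have h1 : ((List.range n.toNat).map (pvF n m c t))[k]? = none := by
          rw [List.getElem?_eq_none] <;> simp <;> omega
        have h2 : ((List.range n.toNat).map (pvF n m c (t + 1)))[k]? = none := by
          rw [List.getElem?_eq_none] <;> simp <;> omega
        simp only [pvMJ, h1, h2, Option.map_none]
        split_ifs <;> rfl
    have hret : PySem.List.pyGetD (pvMJ n m c (t + 1)) (t : Int) 0 = pvR n m c t := by
      rw [PySem.List.pyGetD_natCast]
      have hk : t < n.toNat := by omega
      simp only [pvMJ, List.getD_eq_getElem?_getD, List.getElem?_map, List.getElem?_range, hk]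
      rfl
    simp only [List.foldl_cons, List.foldl_nil, pvAstep, hM, hret]
    refine Prod.ext rfl ?_
    show some (match pvAC n m c t with
      | none => pvR n m c t
      | some a => max a (pvR n m c t)) = pvAC n m c (t + 1)
    rw [pvAC]

theorem pvR_zero (n m : Int) (c : List Int) : pvR n m c 0 = 0 := by
  simp [pvR, pvF]

theorem pvAC_eq (n m : Int) (c : List Int) (t : Nat) :
    pvAC n m c (t + 1) = some (pvE n m c (t + 1)) := by
  induction t with
  | zero => simp [pvAC, pvE, pvR_zero]
  | succ s ih => rw [pvAC, ih]; simp [pvE]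

theorem pvE_nonneg (n m : Int) (c : List Int) (t : Nat) : 0 ≤ pvE n m c t := by
  induction t with
  | zero => simp [pvE]
  | succ s ih => rw [pvE]; exact le_trans ih (le_max_left _ _)

-- closed form of A's array entry: a conditional max-fold over all earlier outer indices
theorem pvF_closed (n m : Int) (c : List Int) (s k : Nat) :
    pvF n m c s k = (List.range s).foldl (fun a p =>
      if p < k ∧ (k : Int) ≤ (p : Int) + m ∧ (k : Int) < n then
        max a (c.getD k 0 - c.getD p 0) else a) 0 := by
  induction s with
  | zero => simp [pvF]
  | succ s ih =>
    rw [List.range_succ, List.foldl_append, ← ih, pvF]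
    simp only [List.foldl_cons, List.foldl_nil]

-- a conditional max-fold over range t whose condition is a lower bound is the fold over the dropped range
theorem pvDropFold (t lo : Nat) (g : Nat → Int) (b : Int) :
    (List.range t).foldl (fun a p => if lo ≤ p then max a (g p) else a) b =
    ((List.range t).drop lo).foldl (fun a p => max a (g p)) b := by
  induction t with
  | zero => simp
  | succ t ih =>
    rw [List.range_succ, List.foldl_append]
    by_cases h : lo ≤ t
    · rw [List.drop_append_of_le_length (by simpa using h), List.foldl_append, ih]
      simp [h]
    · have h1 : (List.range (t + 1)).drop lo = [] := by
        apply List.drop_eq_nil_of_le; simpa using by omega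
      have h2 : (List.range t).drop lo = [] := by
        apply List.drop_eq_nil_of_le; simpa using by omega
      rw [List.range_succ] at h1
      rw [h1]
      rw [h2] at ih
      simp only [List.foldl_nil] at ih ⊢
      simp [ih, h]

-- the dropped index range reads exactly the window slice of c
theorem pvWindowMap (c : List Int) (t lo : Nat) (ht : t ≤ c.length) :
    ((List.range t).drop lo).map (fun p => c.getD p 0) = (c.drop lo).take (t - lo) := by
  apply List.ext_getElem
  · simp; omega
  · intro j h1 h2
    simp only [List.getElem_map, List.getElem_drop, List.getElem_range, List.getElem_take]
    rw [List.getD_eq_getElem c 0 (by simp at h1 ⊢; omega)]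

theorem pvMinMax (xs : List Int) (X b x : Int) :
    xs.foldl (fun a v => max a (X - v)) (max b (X - x)) = max b (X - xs.foldl min x) := by
  induction xs generalizing b x with
  | nil => simp
  | cons v vs ih =>
    simp only [List.foldl_cons]
    rw [show max (max b (X - x)) (X - v) = max b (X - min x v) by
      rw [max_assoc, show max (X - x) (X - v) = X - min x v by
        rcases le_total x v with h | h
        · rw [min_eq_left h, max_eq_left (by omega)]
        · rw [min_eq_right h, max_eq_right (by omega)]]]
    exact ih b (min x v)

-- B's step maxes in exactly the value A records at outer step t
theorem pvBstep_eq (n m : Int) (c : List Int) (t : Nat) (b : Int)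
    (htn : (t : Int) < n) (hlen : n ≤ (c.length : Int)) (hb : 0 ≤ b) :
    pvBstep n m c b (t : Int) = max b (pvR n m c t) := by
  have htc : t ≤ c.length := by omega
  set lo : Nat := ((t : Int) - m).toNat with hlodef
  have hR : pvR n m c t = ((c.drop lo).take (t - lo)).foldl
      (fun a v => max a (c.getD t 0 - v)) 0 := by
    have h0 : pvR n m c t = pvF n m c t t := by
      rw [pvR, pvF]
      simp
    rw [h0, pvF_closed]
    have hcong : (List.range t).foldl (fun a p =>
        if p < t ∧ (t : Int) ≤ (p : Int) + m ∧ (t : Int) < n then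
          max a (c.getD t 0 - c.getD p 0) else a) 0 =
        (List.range t).foldl (fun a p =>
          if lo ≤ p then max a (c.getD t 0 - c.getD p 0) else a) 0 := by
      apply PySem.List.foldl_congr_mem
      intro a p hp
      have hpt : p < t := List.mem_range.mp hp
      have hiff : (p < t ∧ (t : Int) ≤ (p : Int) + m ∧ (t : Int) < n) ↔ lo ≤ p := by
        rw [hlodef]
        constructor
        · rintro ⟨_, h2, _⟩; omega
        · intro h; exact ⟨hpt, by omega, htn⟩
      rw [if_congr hiff rfl rfl]
    rw [hcong, pvDropFold, ← pvWindowMap c t lo htc, List.foldl_map]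
  have hloI : (if (t : Int) - m > 0 then (t : Int) - m else 0) = (lo : Int) := by
    split_ifs <;> omega
  by_cases hlo : lo < t
  · -- nonempty window
    have hne : (c.drop lo).take (t - lo) ≠ [] := by
      intro h
      have := congrArg List.length h
      simp at this
      omega
    obtain ⟨x, xs, hW⟩ := List.exists_cons_of_ne_nil hne
    have hBs : pvBstep n m c b (t : Int) =
        max b (c.getD t 0 - xs.foldl min x) := by
      unfold pvBstep
      rw [hloI, if_pos (by exact_mod_cast hlo)]
      have hsl : PySem.List.slice c (some ((lo : Nat) : Int)) (some ((t : Nat) : Int)) =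
          (c.drop lo).take (t - lo) := PySem.List.slice_natCast c lo t
      rw [hsl, hW, PySem.List.min?_id_cons]
      simp only [Option.getD_some, PySem.List.pyGetD_natCast]
      split_ifs with h
      · exact (max_eq_right h.le).symm
      · exact (max_eq_left (by omega)).symm
    rw [hBs, hR, hW]
    simp only [List.foldl_cons]
    rw [pvMinMax xs (c.getD t 0) 0 x, ← max_assoc, max_eq_left hb]
  · -- empty window: B skips the index, and A recorded 0 there
    have hW0 : (c.drop lo).take (t - lo) = [] := by
      have h0 : t - lo = 0 := by omega
      simp [h0]
    have hR0 : pvR n m c t = 0 := by rw [hR, hW0]; rfl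
    unfold pvBstep
    rw [hloI, if_neg (by exact_mod_cast hlo), hR0, max_eq_left hb]

theorem pvB_inv (n m : Int) (c : List Int) (hlen : n ≤ (c.length : Int)) (t : Nat)
    (ht : (t : Int) ≤ n) :
    (PySem.List.pyRange 0 (t : Int) 1).foldl (pvBstep n m c) 0 = pvE n m c t := by
  induction t with
  | zero =>
    rw [show ((0 : Nat) : Int) = 0 by norm_num, PySem.List.pyRange_one_eq_nil (le_refl 0)]
    rfl
  | succ s ih =>
    have hs : ((s : Nat) : Int) ≤ n := by push_cast at ht ⊢; omega
    rw [show ((s + 1 : Nat) : Int) = ((s : Nat) : Int) + 1 by push_cast; ring,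
      PySem.List.pyRange_one_succ_right (by push_cast; omega), List.foldl_append, ih hs]
    simp only [List.foldl_cons, List.foldl_nil]
    rw [pvBstep_eq n m c s (pvE n m c s)
      (by push_cast at ht ⊢; omega) hlen (pvE_nonneg n m c s)]
    conv_rhs => rw [pvE]

-- ===== VERDICT (by name: the statement is the Claim_ definition above) =====
theorem puntuacion_maxima_discos_spec : Claim_equal_puntuacion_maxima_discos := by
  unfold Claim_equal_puntuacion_maxima_discos
  intro n m c _ hpre
  obtain ⟨hn, hlen⟩ := hpre
  unfold Spec_puntuacion_maxima_discos
  have hNn : ((n.toNat : Nat) : Int) = n := Int.toNat_of_nonneg (by omega)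
  obtain ⟨s, hs⟩ : ∃ s, n.toNat = s + 1 := ⟨n.toNat - 1, by omega⟩
  have hA : puntuacion_maxima_discos n m c = pvE n m c n.toNat := by
    unfold puntuacion_maxima_discos
    have h1 : PySem.List.pyRange 0 n 1 = PySem.List.pyRange 0 ((n.toNat : Nat) : Int) 1 := by
      rw [hNn]
    rw [h1, pvAouter n m c hn n.toNat (le_refl _)]
    show (pvAC n m c n.toNat).getD 0 = pvE n m c n.toNat
    rw [hs, pvAC_eq]
    rfl
  have hB : puntuacion_maxima_discos_alt n m c = pvE n m c n.toNat := by
    unfold puntuacion_maxima_discos_alt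
    have h1 : PySem.List.pyRange 0 n 1 = PySem.List.pyRange 0 ((n.toNat : Nat) : Int) 1 := by
      rw [hNn]
    rw [h1, pvB_inv n m c hlen n.toNat (by rw [hNn])]
  rw [hA, hB]
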